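-- pv_equiv track=rewrite | github.com/biran0079/auto-minesweeper | ms.py | contradiction
-- ===== SOURCE A (Python) =====
-- row = 16
--
-- col = 30
--
-- digits = {'1', '2', '3', '4', '5', '6'}
--
-- def getNeighbor(board, i, j, c):
--     return _getNeightBor(board, i, j, lambda x: x == c)
--
-- def getDigitNeighbor(board, i, j):
--     return _getNeightBor(board, i, j, lambda x: x in digits)
--
-- def _getNeightBor(board, i, j, f):
--     res = []
--     for d in [[-1,-1],[-1,0],[-1,1],[0,-1],[0,1],[1,-1],[1,0],[1,1]]:
--         ti = i + d[0]
--         tj = j + d[1]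
--         if ti >= 0 and ti < row and tj >= 0 and tj < col and f(board[ti][tj]):
--             res.append((ti, tj))
--     return res
--
-- def contradiction(board, unknowns):
--     toCheck = set()
--     for p in unknowns:
--         c = board[p[0]][p[1]]
--         toCheck |= set(getDigitNeighbor(board, p[0], p[1]))
--     for p in toCheck:
--         flags = getNeighbor(board, p[0], p[1], 'f')
--         unknowns = getNeighbor(board, p[0], p[1], '-')
--         mineCount = int(board[p[0]][p[1]])
--         if len(flags) > mineCount or len(flags) + len(unknowns) < mineCount:
--             return True
--     return False
-- ===== SOURCE B (Python) =====
-- row = 16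
--
-- col = 30
--
-- digits = {'1', '2', '3', '4', '5', '6'}
--
-- def contradiction(board, unknowns):
--     # single fused pass with bounded cell lookup and counting; no neighbor
--     # lists and no intermediate dedup set are ever built
--     deltas = [(-1, -1), (-1, 0), (-1, 1), (0, -1), (0, 1), (1, -1), (1, 0), (1, 1)]
--
--     def cell(i, j):
--         if 0 <= i < row and 0 <= j < col:
--             return board[i][j]
--         return None
--
--     for i, j in unknowns:
--         for di, dj in deltas:
--             v = cell(i + di, j + dj)
--             if v in digits:
--                 nf = nu = 0
--                 for ei, ej in deltas:
--                     w = cell(i + di + ei, j + dj + ej)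
--                     if w == 'f':
--                         nf += 1
--                     elif w == '-':
--                         nu += 1
--                 m = int(v)
--                 if nf > m or nf + nu < m:
--                     return True
--     return False
-- ===== Notes on version B (the rewrite author's own statement) =====
-- stated objective: alternative
-- what changed: B fuses A's two phases into one nested scan over the 8 deltas per unknown, checking each digit neighbor immediately with counter accumulators over a bounds-checked cell lookup, instead of building neighbor lists and an intermediate dedup set; rechecking a cell twice cannot change the boolean result.
import Mathlib
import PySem

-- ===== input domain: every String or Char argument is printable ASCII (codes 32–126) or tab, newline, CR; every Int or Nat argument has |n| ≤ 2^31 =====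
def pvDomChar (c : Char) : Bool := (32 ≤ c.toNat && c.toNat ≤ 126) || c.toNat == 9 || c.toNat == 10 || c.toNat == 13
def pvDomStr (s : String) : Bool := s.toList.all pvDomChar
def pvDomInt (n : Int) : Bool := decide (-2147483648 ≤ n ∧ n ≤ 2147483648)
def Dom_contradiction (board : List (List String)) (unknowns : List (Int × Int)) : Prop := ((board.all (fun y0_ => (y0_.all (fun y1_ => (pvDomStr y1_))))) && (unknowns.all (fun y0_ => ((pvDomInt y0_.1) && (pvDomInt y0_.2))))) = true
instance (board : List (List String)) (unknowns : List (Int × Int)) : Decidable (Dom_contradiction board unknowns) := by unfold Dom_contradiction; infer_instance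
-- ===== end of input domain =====

-- B fuses A's two phases (build a dedup set of digit neighbors, then scan it) into one
-- nested per-unknown delta scan with counter accumulators over a bounds-checked cell
-- lookup, dropping all intermediate collections (objective: alternative decomposition).

-- ===== PORT A =====
-- shared module helpers: the 8-delta list and board[i][j] (total form; used only where Python returns)
def pvDeltas : List (Int × Int) := [(-1,-1),(-1,0),(-1,1),(0,-1),(0,1),(1,-1),(1,0),(1,1)]

def pvCell (board : List (List String)) (i j : Int) : String :=
  ((PySem.List.pyGet? board i).bind (fun r => PySem.List.pyGet? r j)).getD ""

def pvIsDigit (s : String) : Bool :=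
  s == "1" || s == "2" || s == "3" || s == "4" || s == "5" || s == "6"

-- _getNeightBor: fold over the deltas, appending in-bounds cells satisfying f
def pvGetNB (board : List (List String)) (i j : Int) (f : String → Bool) : List (Int × Int) :=
  pvDeltas.foldl (fun res d =>
    let ti := i + d.1
    let tj := j + d.2
    if 0 ≤ ti && ti < 16 && 0 ≤ tj && tj < 30 && f (pvCell board ti tj) then res ++ [(ti, tj)]
    else res) []

-- body of A's second loop (the check performed for one cell of toCheck)
def pvCheckA (board : List (List String)) (p : Int × Int) : Bool :=
  let flags := pvGetNB board p.1 p.2 (· == "f")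
  let unknowns2 := pvGetNB board p.1 p.2 (· == "-")
  let mineCount := (PySem.Int.ofStr? (pvCell board p.1 p.2)).getD 0
  decide ((flags.length : Int) > mineCount ∨ (flags.length : Int) + unknowns2.length < mineCount)

def contradiction (board : List (List String)) (unknowns : List (Int × Int)) : Bool :=
  let toCheck : PySem.Set (Int × Int) :=
    unknowns.foldl (fun s p => PySem.Set.union s (pvGetNB board p.1 p.2 pvIsDigit)) PySem.Set.empty
  toCheck.any (pvCheckA board)

-- ===== PORT B =====
-- B's bounded cell lookup: None outside the fixed 16x30 window
def bCell (board : List (List String)) (i j : Int) : Option String :=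
  if 0 ≤ i ∧ i < 16 ∧ 0 ≤ j ∧ j < 30 then
    (PySem.List.pyGet? board i).bind (fun r => PySem.List.pyGet? r j)
  else none

-- B's "v in digits … m = int(v)" fused: exact on the six digit strings, none otherwise
def bDigit? (s : String) : Option Int :=
  if s == "1" then some 1 else if s == "2" then some 2 else if s == "3" then some 3
  else if s == "4" then some 4 else if s == "5" then some 5 else if s == "6" then some 6
  else none

-- B's inner loop: tail-recursive flag/unknown counters over the deltas
def bCount (board : List (List String)) (qi qj : Int) :
    List (Int × Int) → Nat → Nat → Nat × Nat
  | [], nf, nu => (nf, nu)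
  | e :: es, nf, nu =>
    match bCell board (qi + e.1) (qj + e.2) with
    | some w =>
      if w == "f" then bCount board qi qj es (nf + 1) nu
      else if w == "-" then bCount board qi qj es nf (nu + 1)
      else bCount board qi qj es nf nu
    | none => bCount board qi qj es nf nu

def bDeltas : List (Int × Int) := [(-1,-1),(-1,0),(-1,1),(0,-1),(0,1),(1,-1),(1,0),(1,1)]

-- B's middle loop: scan the deltas around one unknown, early-returning on a contradiction
def bScan (board : List (List String)) (i j : Int) : List (Int × Int) → Bool
  | [] => false
  | d :: ds =>
    match bCell board (i + d.1) (j + d.2) with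
    | some v =>
      match bDigit? v with
      | some m =>
        let c := bCount board (i + d.1) (j + d.2) bDeltas 0 0
        if (c.1 : Int) > m || (c.1 : Int) + (c.2 : Int) < m then true
        else bScan board i j ds
      | none => bScan board i j ds
    | none => bScan board i j ds

def contradiction_alt (board : List (List String)) (unknowns : List (Int × Int)) : Bool :=
  match unknowns with
  | [] => false
  | p :: ps => if bScan board p.1 p.2 bDeltas then true else contradiction_alt board ps

-- ===== PRECONDITION & SPEC =====
-- access-check helpers for Pre_ (bounds/membership on the input only; no port code)
def pvD8 : List (Int × Int) := [(-1,-1),(-1,0),(-1,1),(0,-1),(0,1),(1,-1),(1,0),(1,1)]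

def pvAcc (board : List (List String)) (i j : Int) : Bool :=
  ((PySem.List.pyGet? board i).bind (fun r => PySem.List.pyGet? r j)).isSome

def pvDigitAt (board : List (List String)) (i j : Int) : Bool :=
  match (PySem.List.pyGet? board i).bind (fun r => PySem.List.pyGet? r j) with
  | some s => s == "1" || s == "2" || s == "3" || s == "4" || s == "5" || s == "6"
  | none => false

-- every neighbor of (i,j) inside the fixed 16x30 window is an in-range board cell
def pvNbOk (board : List (List String)) (i j : Int) : Bool :=
  pvD8.all (fun d =>
    !(0 ≤ i + d.1 && i + d.1 < 16 && 0 ≤ j + d.2 && j + d.2 < 30) || pvAcc board (i + d.1) (j + d.2))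

-- Pre_ demands that every board access A may perform is in range: each unknown cell
-- itself, each 16x30-window neighbor of an unknown, and each 16x30-window neighbor of a
-- digit cell adjacent to an unknown. Outside Pre_ A usually raises IndexError; on some
-- excluded inputs A still early-returns True because whether the raising cell is reached
-- depends on set iteration (hash) order — an accident of the toCheck set that cannot be
-- stated as a closed form, so those inputs stay excluded (B raises there too).
def Pre_contradiction (board : List (List String)) (unknowns : List (Int × Int)) : Prop :=
  ∀ p ∈ unknowns,
    pvAcc board p.1 p.2 = true ∧ pvNbOk board p.1 p.2 = true ∧
    ∀ d ∈ pvD8,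
      (0 ≤ p.1 + d.1 ∧ p.1 + d.1 < 16 ∧ 0 ≤ p.2 + d.2 ∧ p.2 + d.2 < 30 ∧
        pvDigitAt board (p.1 + d.1) (p.2 + d.2) = true) →
      pvNbOk board (p.1 + d.1) (p.2 + d.2) = true
instance (board : List (List String)) (unknowns : List (Int × Int)) : Decidable (Pre_contradiction board unknowns) := by unfold Pre_contradiction; infer_instance

def pvWitness_contradiction : List (List String) × (List (Int × Int)) :=
  (List.replicate 16 (List.replicate 30 "-"), [(0, 0), (15, 29)])

def Spec_contradiction (board : List (List String)) (unknowns : List (Int × Int)) (out : Bool) : Prop := out = contradiction_alt board unknowns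
instance (board : List (List String)) (unknowns : List (Int × Int)) (out : Bool) : Decidable (Spec_contradiction board unknowns out) := by unfold Spec_contradiction; infer_instance

-- ===== CLAIM (what is proved, stated in full; the proofs are below) =====
def Claim_equal_contradiction : Prop := ∀ (board : List (List String)) (unknowns : List (Int × Int)), Dom_contradiction board unknowns → Pre_contradiction board unknowns → Spec_contradiction board unknowns (contradiction board unknowns)

-- ===== LEMMAS AND PROOFS =====
-- any over a set union = any over each side
theorem pv_any_union {α : Type} [BEq α] [LawfulBEq α] (s : PySem.Set α) (t : List α) (f : α → Bool) :
    (PySem.Set.union s t).any f = (s.any f || t.any f) := by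
  apply Bool.eq_iff_iff.mpr
  simp only [List.any_eq_true, Bool.or_eq_true, PySem.Set.mem_union]
  constructor
  · rintro ⟨y, h | h, hf⟩
    · exact Or.inl ⟨y, h, hf⟩
    · exact Or.inr ⟨y, h, hf⟩
  · rintro (⟨y, h, hf⟩ | ⟨y, h, hf⟩)
    · exact ⟨y, Or.inl h, hf⟩
    · exact ⟨y, Or.inr h, hf⟩

-- any over the union-accumulating fold = any over each contributing list
theorem pv_any_fold_union {α β : Type} [BEq β] [LawfulBEq β]
    (l : List α) (g : α → List β) (f : β → Bool) (s : PySem.Set β) :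
    (l.foldl (fun s p => PySem.Set.union s (g p)) s).any f
      = (s.any f || l.any (fun p => (g p).any f)) := by
  induction l generalizing s with
  | nil => simp
  | cons x xs ih =>
    simp only [List.foldl_cons, List.any_cons, ih, pv_any_union, Bool.or_assoc]

-- any over an append-if fold = any over the qualifying deltas
theorem pv_any_foldl_append {α β : Type} (ds : List α) (c : α → Bool) (g : α → β)
    (h : β → Bool) (acc : List β) :
    (ds.foldl (fun res d => if c d then res ++ [g d] else res) acc).any h
      = (acc.any h || ds.any (fun d => c d && h (g d))) := by
  induction ds generalizing acc with
  | nil => simp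
  | cons x xs ih =>
    by_cases hc : c x = true <;> simp [hc, ih, Bool.or_assoc]

-- length of an append-if fold = countP of the condition
theorem pv_len_foldl_append {α β : Type} (ds : List α) (c : α → Bool) (g : α → β)
    (acc : List β) :
    (ds.foldl (fun res d => if c d then res ++ [g d] else res) acc).length
      = acc.length + ds.countP c := by
  induction ds generalizing acc with
  | nil => simp
  | cons x xs ih =>
    by_cases hc : c x = true <;> simp [hc, ih] <;> omega -- split on hc: both branches need countP_cons arith

-- B's counter loop computes the two counts of matching deltas
theorem bCount_eq (board : List (List String)) (qi qj : Int) (ds : List (Int × Int))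
    (nf nu : Nat) :
    bCount board qi qj ds nf nu
      = (nf + ds.countP (fun e => bCell board (qi + e.1) (qj + e.2) == some "f"),
         nu + ds.countP (fun e => bCell board (qi + e.1) (qj + e.2) == some "-")) := by
  induction ds generalizing nf nu with
  | nil => simp [bCount]
  | cons e es ih =>
    simp only [bCount, List.countP_cons]
    cases hcell : bCell board (qi + e.1) (qj + e.2) with
    | none => simp [ih]
    | some w =>
      by_cases hf : w == "f"
      · have : w = "f" := by simpa using hf
        subst this
        simp [ih]
        omega
      · by_cases hu : w == "-"
        · have : w = "-" := by simpa using hu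
          subst this
          simp [ih]
          omega
        · simp [ih, hf, hu]

-- B's delta scan is an any over the deltas
theorem bScan_eq_any (board : List (List String)) (i j : Int) (ds : List (Int × Int)) :
    bScan board i j ds = ds.any (fun d =>
      match bCell board (i + d.1) (j + d.2) with
      | some v =>
        match bDigit? v with
        | some m =>
          let c := bCount board (i + d.1) (j + d.2) bDeltas 0 0
          (c.1 : Int) > m || (c.1 : Int) + (c.2 : Int) < m
        | none => false
      | none => false) := by
  induction ds with
  | nil => rfl
  | cons d ds ih =>
    cases hc : bCell board (i + d.1) (j + d.2) with
    | none => simp [bScan, hc, ih]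
    | some v =>
      cases hd : bDigit? v with
      | none => simp [bScan, hc, hd, ih]
      | some m =>
        simp only [bScan, hc, hd, List.any_cons, ih]
        split
        · next h => simp [h]
        · next h => simp [Bool.eq_false_iff.mpr h]

-- B's outer loop is an any over the unknowns
theorem contradiction_alt_eq_any (board : List (List String)) (unknowns : List (Int × Int)) :
    contradiction_alt board unknowns
      = unknowns.any (fun p => bScan board p.1 p.2 bDeltas) := by
  induction unknowns with
  | nil => rfl
  | cons p ps ih =>
    simp only [contradiction_alt, List.any_cons, ih]
    split <;> simp_all

-- on the six digit strings, bDigit? is int(·); elsewhere none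
theorem bDigit?_of_isDigit (s : String) (h : pvIsDigit s = true) :
    bDigit? s = some ((PySem.Int.ofStr? s).getD 0) := by
  simp only [pvIsDigit, Bool.or_eq_true, beq_iff_eq] at h
  rcases h with ((((h | h) | h) | h) | h) | h <;> subst h <;> decide

theorem bDigit?_none (s : String) (h : pvIsDigit s = false) : bDigit? s = none := by
  simp only [pvIsDigit, Bool.or_eq_false_iff, beq_eq_false_iff_ne] at h
  obtain ⟨⟨⟨⟨⟨h1, h2⟩, h3⟩, h4⟩, h5⟩, h6⟩ := h
  simp [bDigit?, h1, h2, h3, h4, h5, h6]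

-- A's window+cell test matches B's bounded lookup, for "f"/"-" conditions
theorem cell_cond_eq (board : List (List String)) (ti tj : Int) (t : String)
    (ht : t ≠ "") :
    ((0 ≤ ti && ti < 16 && 0 ≤ tj && tj < 30) && (pvCell board ti tj == t))
      = (bCell board ti tj == some t) := by
  by_cases hw : 0 ≤ ti ∧ ti < 16 ∧ 0 ≤ tj ∧ tj < 30
  · rw [bCell, if_pos hw]
    obtain ⟨h1, h2, h3, h4⟩ := hw
    simp only [pvCell, h1, h2, h3, h4, decide_true, Bool.true_and, Bool.and_true]
    cases ho : (PySem.List.pyGet? board ti).bind (fun r => PySem.List.pyGet? r tj) with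
    | none =>
      have hne : ("" == t) = false := beq_eq_false_iff_ne.mpr (Ne.symm ht)
      simp [hne]
    | some s => simp
  · have hwb : (0 ≤ ti && ti < 16 && 0 ≤ tj && tj < 30) = false := by
      rw [Bool.eq_false_iff]
      intro hc
      exact hw (by simpa [Bool.and_eq_true, decide_eq_true_eq, and_assoc] using hc)
    rw [bCell, if_neg hw, hwb]
    simp

-- the per-digit-cell check of A equals B's counter check
theorem check_eq (board : List (List String)) (qi qj : Int) :
    pvCheckA board (qi, qj)
      = (let c := bCount board qi qj bDeltas 0 0
         let m := (PySem.Int.ofStr? (pvCell board qi qj)).getD 0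
         ((c.1 : Int) > m || (c.1 : Int) + (c.2 : Int) < m)) := by
  have hf : ∀ d : Int × Int,
      ((0 ≤ qi + d.1 && qi + d.1 < 16 && 0 ≤ qj + d.2 && qj + d.2 < 30)
        && (pvCell board (qi + d.1) (qj + d.2) == "f"))
      = (bCell board (qi + d.1) (qj + d.2) == some "f") :=
    fun d => cell_cond_eq board _ _ "f" (by decide)
  have hu : ∀ d : Int × Int,
      ((0 ≤ qi + d.1 && qi + d.1 < 16 && 0 ≤ qj + d.2 && qj + d.2 < 30)
        && (pvCell board (qi + d.1) (qj + d.2) == "-"))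
      = (bCell board (qi + d.1) (qj + d.2) == some "-") :=
    fun d => cell_cond_eq board _ _ "-" (by decide)
  have hlenf : (pvGetNB board qi qj (· == "f")).length
      = (bCount board qi qj bDeltas 0 0).1 := by
    rw [bCount_eq]
    simp only [pvGetNB, pv_len_foldl_append, List.length_nil, Nat.zero_add]
    exact List.countP_congr (fun d _ => by rw [hf d])
  have hlenu : (pvGetNB board qi qj (· == "-")).length
      = (bCount board qi qj bDeltas 0 0).2 := by
    rw [bCount_eq]
    simp only [pvGetNB, pv_len_foldl_append, List.length_nil, Nat.zero_add]
    exact List.countP_congr (fun d _ => by rw [hu d])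
  simp only [pvCheckA, hlenf, hlenu]
  apply Bool.eq_iff_iff.mpr
  simp

-- ===== VERDICT (by name: the statement is the Claim_ definition above) =====
theorem contradiction_spec : Claim_equal_contradiction := by
  intro board unknowns _ _
  show contradiction board unknowns = contradiction_alt board unknowns
  unfold contradiction
  rw [pv_any_fold_union, contradiction_alt_eq_any]
  have hempty : (PySem.Set.empty : PySem.Set (Int × Int)).any (pvCheckA board) = false := by
    simp [PySem.Set.empty]
  rw [hempty, Bool.false_or]
  refine List.any_congr rfl (fun p => ?_)
  rw [bScan_eq_any]
  show (pvGetNB board p.1 p.2 pvIsDigit).any (pvCheckA board) = _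
  simp only [pvGetNB, pv_any_foldl_append, List.any_nil, Bool.false_or]
  show bDeltas.any _ = bDeltas.any _
  refine List.any_congr rfl (fun d => ?_)
  set ti := p.1 + d.1
  set tj := p.2 + d.2
  by_cases hw : 0 ≤ ti ∧ ti < 16 ∧ 0 ≤ tj ∧ tj < 30
  · obtain ⟨h1, h2, h3, h4⟩ := hw
    have hwb : (0 ≤ ti && ti < 16 && 0 ≤ tj && tj < 30) = true := by
      simp [h1, h2, h3, h4]
    have hbc : bCell board ti tj
        = (PySem.List.pyGet? board ti).bind (fun r => PySem.List.pyGet? r tj) := by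
      simp [bCell, h1, h2, h3, h4]
    cases ho : (PySem.List.pyGet? board ti).bind (fun r => PySem.List.pyGet? r tj) with
    | none =>
      have hpv : pvCell board ti tj = "" := by simp [pvCell, ho]
      rw [hbc, ho]
      simp [hwb, hpv, pvIsDigit]
    | some s =>
      have hpv : pvCell board ti tj = s := by simp [pvCell, ho]
      rw [hbc, ho]
      dsimp only
      by_cases hd : pvIsDigit s = true
      · rw [bDigit?_of_isDigit s hd]
        simp only [hwb, hpv, hd, Bool.true_and, Bool.and_true]
        rw [check_eq board ti tj]
        simp [hpv]
      · rw [bDigit?_none s (by simpa using hd)]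
        simp [hwb, hpv, hd]
  · have hwb : (0 ≤ ti && ti < 16 && 0 ≤ tj && tj < 30) = false := by
      rw [Bool.eq_false_iff]
      intro hc
      exact hw (by simpa [Bool.and_eq_true, decide_eq_true_eq, and_assoc] using hc)
    have hbc : bCell board ti tj = none := by simp [bCell, hw]
    rw [hbc]
    simp [hwb]
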